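-- pv_equiv track=rewrite | github.com/Nearata/vvvvid-downloader | vvvvid_downloader/vvvvid.py | ds
-- ===== SOURCE A (Python) =====
-- def ds(h):
--     """ The formula used by VVVVID to get real url from embed_code codes """
--
--     g = "MNOPIJKL89+/4567UVWXQRSTEFGHABCDcdefYZabstuvopqr0123wxyzklmnghij"
--
--     def f(m):
--         l = []
--         o = 0
--         b = False
--         m_len = len(m)
--
--         while ((not b) and o < m_len):
--             n = m[o] << 2
--             o += 1
--             k = -1
--             j = -1
--
--             if o < m_len:
--                 n += m[o] >> 4
--                 o += 1
--
--                 if o < m_len: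
--                     k = (m[o - 1] << 4) & 255
--                     k += m[o] >> 2
--                     o += 1
--
--                     if o < m_len:
--                         j = (m[o - 1] << 6) & 255
--                         j += m[o]
--                         o += 1
--                     else:
--                         b = True
--
--                 else:
--                     b = True
--
--             else:
--                 b = True
--
--             l.append(n)
--
--             if k != -1:
--                 l.append(k)
--
--             if j != -1:
--                 l.append(j)
--
--         return l
--
--     c = []
--     for e in h:
--         c.append(g.index(e))
--
--     c_len = len(c)
--     for e in range(c_len * 2 - 1, -1, -1):
--         a = c[e % c_len] ^ c[(e + 1) % c_len]
--         c[e % c_len] = a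
--
--     c = f(c)
--     d = ''
--     for e in c:
--         d += chr(e)
--
--     return d
-- ===== SOURCE B (Python) =====
-- def ds(h):
--     """ The formula used by VVVVID to get real url from embed_code codes """
--
--     g = "MNOPIJKL89+/4567UVWXQRSTEFGHABCDcdefYZabstuvopqr0123wxyzklmnghij"
--
--     c = [g.index(e) for e in h]
--
--     n = len(c)
--     for e in range(n * 2 - 1, -1, -1):
--         c[e % n] ^= c[(e + 1) % n]
--
--     # decode: walk c in chunks of 4 six-bit values; the tail-length table
--     # (1->1, 2->1, 3->2, 4->3) says how many bytes the chunk yields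
--     out = []
--     i = 0
--     while i < n:
--         v = c[i:i + 4]
--         t = len(v)
--         v = v + [0, 0, 0]
--         b0 = (v[0] << 2) + (v[1] >> 4)
--         b1 = ((v[1] << 4) & 255) + (v[2] >> 2)
--         b2 = ((v[2] << 6) & 255) + v[3]
--         out += [b0, b1, b2][:(0, 1, 1, 2, 3)[t]]
--         i += 4
--
--     return ''.join(map(chr, out))
-- ===== Notes on version B (the rewrite author's own statement) =====
-- stated objective: simpler
-- what changed: B replaces A's inner while-loop state machine (cursor, stop flag, -1 sentinels, nested ifs) with a plain chunks-of-4 loop: each chunk of 4 six-bit values yields up to 3 bytes by fixed bit arithmetic, with a tail-length table 1->1, 2->1, 3->2, 4->3; the char-to-index build becomes a comprehension and the circular-XOR pass is kept.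
import Mathlib
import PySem

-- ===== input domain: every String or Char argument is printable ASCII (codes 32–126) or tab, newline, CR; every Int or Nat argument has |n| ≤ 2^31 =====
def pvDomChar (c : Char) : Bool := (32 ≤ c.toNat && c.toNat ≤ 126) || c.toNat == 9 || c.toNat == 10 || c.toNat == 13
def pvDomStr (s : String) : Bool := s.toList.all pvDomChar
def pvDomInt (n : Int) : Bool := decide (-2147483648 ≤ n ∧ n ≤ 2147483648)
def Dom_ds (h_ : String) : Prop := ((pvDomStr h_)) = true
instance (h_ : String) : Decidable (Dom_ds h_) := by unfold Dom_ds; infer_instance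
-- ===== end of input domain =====

-- B replaces A's stateful while/flag/sentinel decoder with a chunks-of-4 bit-arithmetic loop
-- and a comprehension for the index build (objective: simpler); the circular-XOR pass is unchanged.

-- the alphabet g (shared constant of both Python versions)
def pvG : List Char :=
  "MNOPIJKL89+/4567UVWXQRSTEFGHABCDcdefYZabstuvopqr0123wxyzklmnghij".toList

-- the circular-XOR pass, textually identical in A and B (shared helper).
-- c[e % n]: n > 0 whenever the range is nonempty and 0 ≤ e % n < n, so getD/set are exact.
def vvvXorPass (c0 : List Nat) : List Nat :=
  let n : Int := c0.length
  (PySem.List.pyRange (n * 2 - 1) (-1) (-1)).foldl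
    (fun c e =>
      let i := (PySem.Int.mod e n).toNat
      let a := (c.getD i 0) ^^^ (c.getD (PySem.Int.mod (e + 1) n).toNat 0)
      c.set i a) c0

-- ===== PORT A =====
-- A's inner f: while loop over cursor o with stop flag; the -1 sentinels for k/j are
-- realised by appending in the branch where they were set (values are Nats; m[o] with
-- o < len m is exact as getD).
def dsF (m : List Nat) (o : Nat) (l : List Nat) : List Nat :=
  if o < m.length then
    let n := (m.getD o 0) <<< 2
    let o1 := o + 1
    if o1 < m.length then
      let n := n + ((m.getD o1 0) >>> 4)
      let o2 := o1 + 1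
      if o2 < m.length then
        let k := (((m.getD (o2 - 1) 0) <<< 4) &&& 255) + ((m.getD o2 0) >>> 2)
        let o3 := o2 + 1
        if o3 < m.length then
          let j := (((m.getD (o3 - 1) 0) <<< 6) &&& 255) + (m.getD o3 0)
          dsF m (o3 + 1) (l ++ [n, k, j])
        else l ++ [n, k]          -- b := True; j = -1 not appended
      else l ++ [n]               -- b := True; k = j = -1 not appended
    else l ++ [n]                 -- b := True
  else l
termination_by m.length - o

-- g.index(e): ValueError (e ∉ g) is excluded by Pre_ds; there index? is some, getD 0 exact.
def ds (h_ : String) : String :=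
  let c := h_.toList.foldl (fun c e => c ++ [(PySem.List.index? pvG e).getD 0]) []
  let c := vvvXorPass c
  let c := dsF c 0 []
  -- chr(e): values here are < 256, where Char.ofNat is exact
  c.foldl (fun d e => d.push (Char.ofNat e)) ""

-- ===== PORT B =====
-- B's decoder: an index loop over chunks of 4; c[i:i+4] on a list is exactly
-- (c.drop i).take 4 (PySem.List.slice_natCast_add).
def dsDecIdx (c : List Nat) (i : Nat) : List Nat :=
  if i < c.length then
    let v := (c.drop i).take 4
    let t := v.length
    let v2 := v ++ [0, 0, 0]
    let b0 := ((v2.getD 0 0) <<< 2) + ((v2.getD 1 0) >>> 4)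
    let b1 := (((v2.getD 1 0) <<< 4) &&& 255) + ((v2.getD 2 0) >>> 2)
    let b2 := (((v2.getD 2 0) <<< 6) &&& 255) + (v2.getD 3 0)
    ([b0, b1, b2].take ([0, 1, 1, 2, 3].getD t 0)) ++ dsDecIdx c (i + 4)
  else []
termination_by c.length - i

def ds_alt (h_ : String) : String :=
  let c := h_.toList.map (fun e => (PySem.List.index? pvG e).getD 0)
  let c := vvvXorPass c
  -- ''.join(map(chr, out)); values are < 256, where Char.ofNat is exact
  String.ofList ((dsDecIdx c 0).map Char.ofNat)

-- ===== PRECONDITION & SPEC =====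
-- Pre_ds excludes exactly the inputs on which A raises ValueError (a character not in g).
def Pre_ds (h_ : String) : Prop := (h_.toList.all (fun c => pvG.contains c)) = true
instance (h_ : String) : Decidable (Pre_ds h_) := by unfold Pre_ds; infer_instance
def pvWitness_ds : String := "MNOPab"

def Spec_ds (h_ : String) (out : String) : Prop := out = ds_alt h_
instance (h_ : String) (out : String) : Decidable (Spec_ds h_ out) := by unfold Spec_ds; infer_instance

-- ===== CLAIM (what is proved, stated in full; the proofs are below) =====
def Claim_equal_ds : Prop := ∀ (h_ : String), Dom_ds h_ → Pre_ds h_ → Spec_ds h_ (ds h_)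

-- ===== LEMMAS AND PROOFS =====

-- proof-side helper: B's chunk loop re-expressed as structural recursion on the list
def dsDec (c : List Nat) : List Nat :=
  if c.isEmpty then [] else
    let v := c.take 4
    let t := v.length
    let rest := c.drop 4
    let v2 := v ++ [0, 0, 0]
    let b0 := ((v2.getD 0 0) <<< 2) + ((v2.getD 1 0) >>> 4)
    let b1 := (((v2.getD 1 0) <<< 4) &&& 255) + ((v2.getD 2 0) >>> 2)
    let b2 := (((v2.getD 2 0) <<< 6) &&& 255) + (v2.getD 3 0)
    ([b0, b1, b2].take ([0, 1, 1, 2, 3].getD t 0)) ++ dsDec rest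
termination_by c.length
decreasing_by cases c with
  | nil => simp_all
  | cons a t => simp

-- B's index loop is that structural recursion started at the dropped prefix
theorem dsDecIdx_eq (c : List Nat) (i : Nat) : dsDecIdx c i = dsDec (c.drop i) := by
  rw [dsDecIdx, dsDec]
  by_cases h : i < c.length
  · rw [dsDecIdx_eq c (i + 4)]
    have hne : ¬ (c.drop i).isEmpty := by
      simp [List.isEmpty_iff, List.drop_eq_nil_iff]; omega
    simp [h, hne, List.drop_drop, Nat.add_comm]
  · have hd : c.drop i = [] := by rw [List.drop_eq_nil_iff]; omega
    simp [h, hd]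
termination_by c.length - i

-- one-step evaluations of the chunk recursion on explicit chunk shapes
theorem dsDec_nil : dsDec [] = [] := by rw [dsDec]; simp

theorem dsDec_one (a : Nat) : dsDec [a] = [a <<< 2] := by
  rw [dsDec]; simp [dsDec_nil]

theorem dsDec_two (a b : Nat) : dsDec [a, b] = [(a <<< 2) + (b >>> 4)] := by
  rw [dsDec]; simp [dsDec_nil]

theorem dsDec_three (a b c : Nat) :
    dsDec [a, b, c] = [(a <<< 2) + (b >>> 4), ((b <<< 4) &&& 255) + (c >>> 2)] := by
  rw [dsDec]; simp [dsDec_nil]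

theorem dsDec_cons4 (a b c d : Nat) (r : List Nat) :
    dsDec (a :: b :: c :: d :: r) =
      [(a <<< 2) + (b >>> 4), ((b <<< 4) &&& 255) + (c >>> 2),
       ((c <<< 6) &&& 255) + d] ++ dsDec r := by
  rw [dsDec]; simp

-- A's decoder equals the chunk recursion, for any cursor position and accumulator
theorem dsF_eq (m : List Nat) (o : Nat) (l : List Nat) :
    dsF m o l = l ++ dsDec (m.drop o) := by
  rw [dsF]
  by_cases h0 : o < m.length
  · by_cases h1 : o + 1 < m.length
    · by_cases h2 : o + 1 + 1 < m.length
      · by_cases h3 : o + 1 + 1 + 1 < m.length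
        · simp only [if_pos h0, if_pos h1, if_pos h2, if_pos h3]
          rw [dsF_eq m (o + 1 + 1 + 1 + 1),
              List.drop_eq_getElem_cons h0, List.drop_eq_getElem_cons h1,
              List.drop_eq_getElem_cons h2, List.drop_eq_getElem_cons h3, dsDec_cons4]
          simp [List.getD_eq_getElem?_getD, h0, h1, h2, h3]
        · have hd : m.drop (o + 1 + 1 + 1) = [] := by
            rw [List.drop_eq_nil_iff]; omega
          simp only [if_pos h0, if_pos h1, if_pos h2, if_neg h3]
          rw [List.drop_eq_getElem_cons h0, List.drop_eq_getElem_cons h1,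
              List.drop_eq_getElem_cons h2, hd, dsDec_three]
          simp [List.getD_eq_getElem?_getD, h0, h1, h2]
      · have hd : m.drop (o + 1 + 1) = [] := by
          rw [List.drop_eq_nil_iff]; omega
        simp only [if_pos h0, if_pos h1, if_neg h2]
        rw [List.drop_eq_getElem_cons h0, List.drop_eq_getElem_cons h1, hd, dsDec_two]
        simp [List.getD_eq_getElem?_getD, h0, h1]
    · have hd : m.drop (o + 1) = [] := by
        rw [List.drop_eq_nil_iff]; omega
      simp only [if_pos h0, if_neg h1]
      rw [List.drop_eq_getElem_cons h0, hd, dsDec_one]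
      simp [List.getD_eq_getElem?_getD, h0]
  · have hd : m.drop o = [] := by rw [List.drop_eq_nil_iff]; omega
    rw [hd, dsDec_nil]
    simp [h0]
termination_by m.length - o

-- A's character-appending loop equals String.ofList of the mapped list
theorem foldl_push_eq_ofList (xs : List Nat) (s : String) :
    xs.foldl (fun d e => d.push (Char.ofNat e)) s =
      String.ofList (s.toList ++ xs.map Char.ofNat) := by
  induction xs generalizing s with
  | nil => simp
  | cons a t ih => simp [ih]

-- ===== VERDICT (by name: the statement is the Claim_ definition above) =====
theorem ds_spec : Claim_equal_ds := by
  intro h_ _ _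
  simp only [Spec_ds, ds, ds_alt]
  rw [PySem.List.foldl_append_singleton_eq_map, dsF_eq, foldl_push_eq_ofList, dsDecIdx_eq]
  simp
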